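-- pv_equiv track=rewrite | github.com/azaj01/spatial-reasoning | src/spatial_reasoning/evaluation/analysis.py | bucket_resolution
-- ===== SOURCE A (Python) =====
-- from typing import Dict, Iterable, List, Optional
--
-- def bucket_resolution(resolution: object) -> Optional[str]:
--     if not resolution:
--         return None
--     if isinstance(resolution, (list, tuple)) and resolution:
--         try:
--             dims = [int(v) for v in resolution]
--         except (TypeError, ValueError):
--             return None
--         major_axis = max(dims)
--         if major_axis < 1024:
--             return "standard"
--         if major_axis <= 2048:
--             return "medium"
--         return "high"
--     return None
-- ===== SOURCE B (Python) =====
-- _LABELS = ("standard", "medium", "high")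
--
-- def bucket_resolution(resolution):
--     if not resolution:
--         return None
--     if isinstance(resolution, (list, tuple)) and resolution:
--         best = -1
--         try:
--             for v in resolution:
--                 d = int(v)
--                 cat = (d >= 1024) + (d > 2048)
--                 if cat > best:
--                     best = cat
--         except (TypeError, ValueError):
--             return None
--         return _LABELS[best]
--     return None
-- ===== Notes on version B (the rewrite author's own statement) =====
-- stated objective: alternative
-- what changed: instead of building an int list, taking its max and threshold-chaining on that max, B classifies each dimension into a bucket index on the fly in a single pass and keeps only the running maximum bucket index (correct because bucketing is monotone), then indexes a label table
import Mathlib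
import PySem

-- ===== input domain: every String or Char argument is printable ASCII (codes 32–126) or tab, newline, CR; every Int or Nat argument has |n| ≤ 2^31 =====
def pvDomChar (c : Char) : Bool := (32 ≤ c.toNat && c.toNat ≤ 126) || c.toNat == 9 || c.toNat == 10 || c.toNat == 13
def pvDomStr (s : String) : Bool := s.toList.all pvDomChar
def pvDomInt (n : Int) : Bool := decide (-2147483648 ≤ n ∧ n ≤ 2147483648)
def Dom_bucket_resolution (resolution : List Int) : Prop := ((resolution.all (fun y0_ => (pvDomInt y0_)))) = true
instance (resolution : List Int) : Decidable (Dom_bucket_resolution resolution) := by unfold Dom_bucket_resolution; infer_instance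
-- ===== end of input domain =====

-- B replaces A's max-then-threshold-chain by a single pass that classifies each
-- dimension into a bucket index and keeps the running maximum index (objective: alternative).

-- ===== PORT A =====
def bucket_resolution (resolution : List Int) : Option String :=
  if resolution = [] then none
  else
    let dims := resolution.map (fun v => v)   -- int(v) is the identity on ints
    match PySem.List.max? dims (fun x => x) with
    | none => none
    | some major_axis =>
      if major_axis < 1024 then some "standard"
      else if major_axis ≤ 2048 then some "medium"
      else some "high"

-- ===== PORT B =====
def pvLabels : List String := ["standard", "medium", "high"]

def bucket_resolution_alt (resolution : List Int) : Option String :=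
  if resolution = [] then none
  else
    let best := resolution.foldl (fun b v =>
      let cat : Int := (if v ≥ 1024 then 1 else 0) + (if v > 2048 then 1 else 0)
      if cat > b then cat else b) (-1)
    PySem.List.pyGet? pvLabels best

-- ===== PRECONDITION & SPEC =====
def Spec_bucket_resolution (resolution : List Int) (out : Option String) : Prop := out = bucket_resolution_alt resolution
instance (resolution : List Int) (out : Option String) : Decidable (Spec_bucket_resolution resolution out) := by unfold Spec_bucket_resolution; infer_instance

-- ===== CLAIM (what is proved, stated in full; the proofs are below) =====
def Claim_equal_bucket_resolution : Prop := ∀ (resolution : List Int), Dom_bucket_resolution resolution → Spec_bucket_resolution resolution (bucket_resolution resolution)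

-- ===== LEMMAS AND PROOFS =====

def pvCat (v : Int) : Int := (if v ≥ 1024 then 1 else 0) + (if v > 2048 then 1 else 0)

lemma step_eq_maxcat (b v : Int) :
    (let cat : Int := (if v ≥ 1024 then 1 else 0) + (if v > 2048 then 1 else 0);
      if cat > b then cat else b) = max b (pvCat v) := by
  simp only [pvCat]; split_ifs <;> omega

lemma cat_max (a b : Int) : pvCat (max a b) = max (pvCat a) (pvCat b) := by
  simp only [pvCat]; rcases le_total a b with h | h <;> simp [h] <;>
    split_ifs <;> omega

lemma fold_cat (t : List Int) (x : Int) :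
    t.foldl (fun b v => max b (pvCat v)) (pvCat x) = pvCat (t.foldl max x) := by
  induction t generalizing x with
  | nil => rfl
  | cons v t ih =>
    simp only [List.foldl_cons, ← cat_max]
    exact ih (max x v)

lemma get_labels_cat (m : Int) :
    PySem.List.pyGet? pvLabels (pvCat m) =
      if m < 1024 then some "standard" else if m ≤ 2048 then some "medium" else some "high" := by
  simp only [pvCat, pvLabels]
  split_ifs <;> simp_all [PySem.List.pyGet?, PySem.List.pyIdx?] <;> omega

-- ===== VERDICT (by name: the statement is the Claim_ definition above) =====
theorem bucket_resolution_spec : Claim_equal_bucket_resolution := by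
  intro resolution _
  unfold Spec_bucket_resolution bucket_resolution bucket_resolution_alt
  cases resolution with
  | nil => rfl
  | cons x t =>
    simp only [List.map_id', PySem.List.max?_id_cons, if_neg (List.cons_ne_nil x t),
      List.foldl_cons]
    have h0 : (let cat : Int := (if x ≥ 1024 then 1 else 0) + (if x > 2048 then 1 else 0);
        if cat > (-1 : Int) then cat else -1) = pvCat x := by
      simp only [pvCat]; split_ifs <;> omega
    simp only [step_eq_maxcat] at h0 ⊢
    rw [h0, fold_cat, get_labels_cat]
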